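-- pv_equiv track=rewrite | github.com/intercom/gtm-mirofish-demo | backend/app/api/audit_log.py | _filter_entries
-- ===== SOURCE A (Python) =====
-- def _filter_entries(entries, args):
--     """Apply query-string filters to an entry list."""
--     action = args.get('action')
--     if action:
--         entries = [e for e in entries if e['action'] == action]
--
--     user = args.get('user')
--     if user:
--         q = user.lower()
--         entries = [e for e in entries if q in e['actor'].lower()]
--
--     since = args.get('since')
--     if since:
--         entries = [e for e in entries if e['timestamp'] >= since]
--
--     until = args.get('until')
--     if until:
--         entries = [e for e in entries if e['timestamp'] <= until]
--
--     search = args.get('search')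
--     if search:
--         q = search.lower()
--         entries = [
--             e for e in entries
--             if q in (e.get('resource_type') or '').lower()
--             or q in (e.get('resource_id') or '').lower()
--             or q in (e.get('details') or '').lower()
--         ]
--
--     return entries
-- ===== SOURCE B (Python) =====
-- def _filter_entries(entries, args):
--     """Apply query-string filters to an entry list (single pass)."""
--     action = args.get('action')
--     user = args.get('user')
--     uq = user.lower() if user else None
--     since = args.get('since')
--     until = args.get('until')
--     search = args.get('search')
--     sq = search.lower() if search else None
--
--     def keep(e):
--         if action and e['action'] != action:
--             return False
--         if uq is not None and uq not in e['actor'].lower():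
--             return False
--         if since and e['timestamp'] < since:
--             return False
--         if until and e['timestamp'] > until:
--             return False
--         if sq is not None:
--             return (sq in (e.get('resource_type') or '').lower()
--                     or sq in (e.get('resource_id') or '').lower()
--                     or sq in (e.get('details') or '').lower())
--         return True
--
--     return [e for e in entries if keep(e)]
-- ===== Notes on version B (the rewrite author's own statement) =====
-- stated objective: alternative
-- what changed: A rebuilds the entry list in up to five sequential list-comprehension passes, one per active filter; B normalizes the active filters once and makes a single pass over the entries with one conjunctive keep() predicate, so no intermediate lists are built.
-- outside the precondition, e.g. on _filter_entries([{'action': 'x'}], {'action': 'a', 'user': 'u'}): A returns [], B returns []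
import Mathlib
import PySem

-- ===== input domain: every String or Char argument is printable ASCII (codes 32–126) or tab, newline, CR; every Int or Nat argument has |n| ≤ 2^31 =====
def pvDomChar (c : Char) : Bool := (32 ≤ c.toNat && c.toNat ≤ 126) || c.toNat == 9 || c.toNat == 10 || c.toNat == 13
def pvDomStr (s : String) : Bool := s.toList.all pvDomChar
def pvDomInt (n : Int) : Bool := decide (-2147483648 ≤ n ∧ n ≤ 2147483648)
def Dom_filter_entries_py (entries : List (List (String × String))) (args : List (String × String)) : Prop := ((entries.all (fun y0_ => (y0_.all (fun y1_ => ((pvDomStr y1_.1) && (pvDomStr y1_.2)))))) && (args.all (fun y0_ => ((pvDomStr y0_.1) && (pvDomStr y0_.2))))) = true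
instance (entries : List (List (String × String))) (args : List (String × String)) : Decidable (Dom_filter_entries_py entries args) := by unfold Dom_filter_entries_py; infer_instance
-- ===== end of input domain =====

-- B replaces A's five sequential list-comprehension passes by one pass with a single
-- conjunctive predicate built from the filters normalized once up front (objective: alternative).


-- shared dict-lookup primitives (both Pythons read the same dicts the same way)
-- d.get(k) on an association-list dict (first match):
def pvGet (d : List (String × String)) (k : String) : Option String :=
  (PySem.Dict.mk d).get? k
-- truthiness of an Optional[str]: non-None and non-empty
def pvTruthy (o : Option String) : Bool :=
  match o with | some s => s != "" | none => false
-- e[k] — exact only when the key is present (Pre_ guarantees that where a port reads it);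
-- (e.get(k) or '') — exact everywhere ('' for both a missing key and an empty value)
def pvGetD (d : List (String × String)) (k : String) : String :=
  (pvGet d k).getD ""

-- ===== PORT A =====
def filter_entries_py (entries : List (List (String × String))) (args : List (String × String)) : List (List (String × String)) :=
  let action := pvGet args "action"
  let entries1 := if pvTruthy action then
      entries.filter (fun e => pvGetD e "action" == action.getD "")
    else entries
  let user := pvGet args "user"
  let entries2 := if pvTruthy user then
      let q := PySem.Str.lower (user.getD "")
      entries1.filter (fun e => PySem.Str.isIn q (PySem.Str.lower (pvGetD e "actor")))
    else entries1
  let since := pvGet args "since"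
  let entries3 := if pvTruthy since then
      -- e['timestamp'] >= since  (Python str comparison = code-point lexicographic '<')
      entries2.filter (fun e => !PySem.Chars.strLt (pvGetD e "timestamp").toList (since.getD "").toList)
    else entries2
  let until_ := pvGet args "until"
  let entries4 := if pvTruthy until_ then
      entries3.filter (fun e => !PySem.Chars.strLt (until_.getD "").toList (pvGetD e "timestamp").toList)
    else entries3
  let search := pvGet args "search"
  if pvTruthy search then
    let q := PySem.Str.lower (search.getD "")
    entries4.filter (fun e =>
      PySem.Str.isIn q (PySem.Str.lower (pvGetD e "resource_type")) ||
      PySem.Str.isIn q (PySem.Str.lower (pvGetD e "resource_id")) ||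
      PySem.Str.isIn q (PySem.Str.lower (pvGetD e "details")))
  else entries4

-- ===== PORT B =====
-- B normalizes the active filters once, then keeps an entry iff it passes every active predicate.
def pvKeep (action : Option String) (uq : Option String) (since : Option String)
    (until_ : Option String) (sq : Option String) (e : List (String × String)) : Bool :=
  (!pvTruthy action || pvGetD e "action" == action.getD "") &&
  (match uq with
   | some q => PySem.Str.isIn q (PySem.Str.lower (pvGetD e "actor"))
   | none => true) &&
  (!pvTruthy since || !PySem.Chars.strLt (pvGetD e "timestamp").toList (since.getD "").toList) &&
  (!pvTruthy until_ || !PySem.Chars.strLt (until_.getD "").toList (pvGetD e "timestamp").toList) &&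
  (match sq with
   | some q =>
      PySem.Str.isIn q (PySem.Str.lower (pvGetD e "resource_type")) ||
      PySem.Str.isIn q (PySem.Str.lower (pvGetD e "resource_id")) ||
      PySem.Str.isIn q (PySem.Str.lower (pvGetD e "details"))
   | none => true)

def filter_entries_py_alt (entries : List (List (String × String))) (args : List (String × String)) : List (List (String × String)) :=
  let action := pvGet args "action"
  let user := pvGet args "user"
  let uq := if pvTruthy user then some (PySem.Str.lower (user.getD "")) else none
  let since := pvGet args "since"
  let until_ := pvGet args "until"
  let search := pvGet args "search"
  let sq := if pvTruthy search then some (PySem.Str.lower (search.getD "")) else none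
  entries.filter (pvKeep action uq since until_ sq)

-- ===== PRECONDITION & SPEC =====
-- Pre_ excludes the inputs on which an active filter reads a key some entry lacks: there the
-- Python (A and B alike) raises KeyError — except when an earlier active filter already discards
-- that entry and A (and B, short-circuiting identically) still returns; requiring the key on
-- EVERY entry is that slightly conservative closed form (see claim.json cites for an example).
def Pre_filter_entries_py (entries : List (List (String × String))) (args : List (String × String)) : Prop :=
  (pvTruthy (pvGet args "action") = true → ∀ e ∈ entries, (pvGet e "action").isSome = true) ∧
  (pvTruthy (pvGet args "user") = true → ∀ e ∈ entries, (pvGet e "actor").isSome = true) ∧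
  ((pvTruthy (pvGet args "since") = true ∨ pvTruthy (pvGet args "until") = true) →
    ∀ e ∈ entries, (pvGet e "timestamp").isSome = true)
instance (entries : List (List (String × String))) (args : List (String × String)) : Decidable (Pre_filter_entries_py entries args) := by unfold Pre_filter_entries_py; infer_instance

def pvWitness_filter_entries_py : (List (List (String × String))) × (List (String × String)) :=
  ([[("action", "edit"), ("actor", "Bob"), ("timestamp", "2024-01-02")]], [("action", "edit")])

def Spec_filter_entries_py (entries : List (List (String × String))) (args : List (String × String)) (out : List (List (String × String))) : Prop := out = filter_entries_py_alt entries args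
instance (entries : List (List (String × String))) (args : List (String × String)) (out : List (List (String × String))) : Decidable (Spec_filter_entries_py entries args out) := by unfold Spec_filter_entries_py; infer_instance

-- ===== CLAIM (what is proved, stated in full; the proofs are below) =====
def Claim_equal_filter_entries_py : Prop := ∀ (entries : List (List (String × String))) (args : List (String × String)), Dom_filter_entries_py entries args → Pre_filter_entries_py entries args → Spec_filter_entries_py entries args (filter_entries_py entries args)

-- ===== LEMMAS AND PROOFS =====
-- an inactive filter is filtering by the constant-true predicate
theorem pvFilterIf {a : Type} (t : Bool) (p : a -> Bool) (l : List a) :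
    (if t = true then l.filter p else l) = l.filter (fun e => !t || p e) := by
  cases t <;> simp

-- B's normalized optional query: the match collapses to the same guarded predicate
theorem pvMatchIf (t : Bool) (s : String) (g : String -> Bool) :
    (match (if t = true then some s else none) with | some q => g q | none => true) = (!t || g s) := by
  cases t <;> simp

-- ===== VERDICT (by name: the statement is the Claim_ definition above) =====
theorem filter_entries_py_spec : Claim_equal_filter_entries_py := by
  intro entries args _ _
  unfold Spec_filter_entries_py filter_entries_py filter_entries_py_alt pvKeep
  dsimp only
  simp only [pvMatchIf]
  simp only [pvFilterIf]
  simp only [List.filter_filter]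
  refine List.filter_congr (fun e _ => ?_)
  simp [Bool.and_comm, Bool.and_left_comm, Bool.and_assoc]
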